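-- pv_equiv track=rewrite | github.com/miliar/Code_Jam_Webscraper | solutions_python/solutions_year12_round0_nr3/415.py | isDistinguishable
-- ===== SOURCE A (Python) =====
-- def isDistinguishable(num):
-- 	strNum = str(num);
-- 	limit = len(strNum);
--
-- 	if(1 == limit):
-- 		return False;
-- 	elif(2 == limit):
-- 		return strNum[0] != strNum[1];
--
-- 	for idx in range(1, limit):
-- 		if(strNum[0] != strNum[idx]):
-- 			return True;
--
-- 	return False;
-- ===== SOURCE B (Python) =====
-- def isDistinguishable(num):
--     return len(set(str(num))) > 1
-- ===== Notes on version B (the rewrite author's own statement) =====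
-- stated objective: simpler
-- what changed: Replaced the branch-per-length early-exit scan comparing every digit to the first with a one-liner that builds the set of distinct characters of str(num) and tests whether its size exceeds 1.
import Mathlib
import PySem

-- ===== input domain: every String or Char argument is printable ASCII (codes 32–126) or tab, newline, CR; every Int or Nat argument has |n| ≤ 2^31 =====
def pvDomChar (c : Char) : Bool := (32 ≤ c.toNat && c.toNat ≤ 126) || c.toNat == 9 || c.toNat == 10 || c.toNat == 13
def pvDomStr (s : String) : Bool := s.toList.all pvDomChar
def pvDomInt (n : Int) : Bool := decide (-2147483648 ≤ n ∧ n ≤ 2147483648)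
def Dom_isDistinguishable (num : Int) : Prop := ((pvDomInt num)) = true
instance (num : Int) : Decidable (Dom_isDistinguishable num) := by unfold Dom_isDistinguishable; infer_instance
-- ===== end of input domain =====

-- B replaces A's branch-per-length early-exit scan against the first character with
-- "size of the set of distinct characters of str(num) exceeds 1" (objective: simpler).


-- ===== PORT A =====
def isDistinguishable (num : Int) : Bool :=
  let strNum := PySem.Int.toChars num
  let limit := PySem.List.len strNum
  if 1 = limit then false
  else if 2 = limit then
    decide (PySem.List.pyGet? strNum 0 ≠ PySem.List.pyGet? strNum 1)
  else
    -- for idx in range(1, limit): if strNum[0] != strNum[idx]: return True  — early-exit loop = any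
    (PySem.List.pyRange 1 limit 1).any
      (fun idx => decide (PySem.List.pyGet? strNum 0 ≠ PySem.List.pyGet? strNum idx))

-- ===== PORT B =====
def isDistinguishable_alt (num : Int) : Bool :=
  decide (1 < PySem.Set.len (PySem.Set.ofList (PySem.Int.toChars num)))

-- ===== PRECONDITION & SPEC =====
def Spec_isDistinguishable (num : Int) (out : Bool) : Prop := out = isDistinguishable_alt num
instance (num : Int) (out : Bool) : Decidable (Spec_isDistinguishable num out) := by unfold Spec_isDistinguishable; infer_instance

-- ===== CLAIM (what is proved, stated in full; the proofs are below) =====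
def Claim_equal_isDistinguishable : Prop := ∀ (num : Int), Dom_isDistinguishable num → Spec_isDistinguishable num (isDistinguishable num)

-- ===== LEMMAS AND PROOFS =====

theorem two_mem_len {α : Type} (l : List α) (a b : α) (ha : a ∈ l) (hb : b ∈ l) (hne : a ≠ b) :
    2 ≤ l.length := by
  match l with
  | [] => simp at ha
  | [y] => simp at ha hb; exact absurd (ha.trans hb.symm) hne
  | _ :: _ :: _ => simp

theorem all_eq_foldl (c : Char) (rest : List Char) (h : ∀ x ∈ rest, x = c) :
    List.foldl PySem.Set.add [c] rest = [c] := by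
  induction rest with
  | nil => rfl
  | cons y t ih =>
    have hy : y = c := h y (by simp)
    simp only [List.foldl, hy, PySem.Set.add, PySem.Set.contains]
    simp only [List.elem_cons_self, if_true]
    exact ih (fun x hx => h x (by simp [hx]))

theorem portB_eq_exists (cs : List Char) :
    decide (1 < PySem.Set.len (PySem.Set.ofList cs))
    = decide (∃ x ∈ cs.tail, x ≠ cs.head?.getD ' ') := by
  match cs with
  | [] => simp [PySem.Set.len, PySem.Set.ofList_eq_foldl]
  | c :: rest =>
    simp only [List.tail_cons, List.head?_cons, Option.getD_some, decide_eq_decide]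
    constructor
    · intro hlen
      by_contra hno
      push Not at hno
      have : PySem.Set.ofList (c :: rest) = [c] := by
        rw [PySem.Set.ofList_eq_foldl]
        simp only [List.foldl]
        have : PySem.Set.add [] c = [c] := by simp [PySem.Set.add, PySem.Set.contains]
        rw [this]
        exact all_eq_foldl c rest hno
      rw [this] at hlen
      simp [PySem.Set.len] at hlen
    · rintro ⟨x, hx, hne⟩
      have hcm : c ∈ PySem.Set.ofList (c :: rest) := (PySem.Set.mem_ofList _ _).mpr (by simp)
      have hxm : x ∈ PySem.Set.ofList (c :: rest) := (PySem.Set.mem_ofList _ _).mpr (by simp [hx])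
      have := two_mem_len _ _ _ hxm hcm hne
      simp [PySem.Set.len]
      omega

theorem loop_eq (c : Char) (rest : List Char) :
    ((PySem.List.pyRange 1 (PySem.List.len (c :: rest)) 1).any
      (fun idx => decide (PySem.List.pyGet? (c :: rest) 0 ≠ PySem.List.pyGet? (c :: rest) idx)))
    = decide (∃ x ∈ rest, x ≠ c) := by
  rw [PySem.List.pyRange_one]
  simp only [PySem.List.len_eq, List.length_cons]
  have htn : (((rest.length + 1 : Nat) : Int) - 1).toNat = rest.length := by omega
  rw [htn]
  rw [Bool.eq_iff_iff]
  simp only [List.any_map, List.any_eq_true, List.mem_range,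
    decide_eq_true_iff, PySem.List.pyGet?_zero_cons, Function.comp_apply]
  constructor
  · rintro ⟨k, hk, hne⟩
    rw [add_comm, PySem.List.pyGet?_cons_succ, PySem.List.pyGet?_natCast,
      List.getElem?_eq_getElem hk] at hne
    exact ⟨rest[k], List.getElem_mem hk, fun h => hne (by rw [h])⟩
  · rintro ⟨x, hx, hne⟩
    obtain ⟨k, hk, hkx⟩ := List.getElem_of_mem hx
    refine ⟨k, hk, ?_⟩
    rw [add_comm, PySem.List.pyGet?_cons_succ, PySem.List.pyGet?_natCast,
      List.getElem?_eq_getElem hk, hkx]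
    exact fun h => hne (by injection h with h'; exact h'.symm)

theorem portA_eq_exists (cs : List Char) :
    (let limit := PySem.List.len cs
     if 1 = limit then false
     else if 2 = limit then
       decide (PySem.List.pyGet? cs 0 ≠ PySem.List.pyGet? cs 1)
     else
       (PySem.List.pyRange 1 limit 1).any
         (fun idx => decide (PySem.List.pyGet? cs 0 ≠ PySem.List.pyGet? cs idx)))
    = decide (∃ x ∈ cs.tail, x ≠ cs.head?.getD ' ') := by
  match cs with
  | [] =>
    simp [PySem.List.len_eq, PySem.List.pyRange_one_eq_nil (by norm_num : (0:Int) ≤ 1)]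
  | [c] => simp [PySem.List.len_eq]
  | [c, d] =>
    simp only [PySem.List.len_eq, List.length_cons, List.length_nil]
    norm_num
    exact eq_comm
  | c :: d :: e :: t =>
    simp only [PySem.List.len_eq, List.length_cons]
    have h1 : ¬ (1 = ((t.length + 1 + 1 + 1 : Nat) : Int)) := by omega
    have h2 : ¬ (2 = ((t.length + 1 + 1 + 1 : Nat) : Int)) := by omega
    rw [if_neg h1, if_neg h2]
    have := loop_eq c (d :: e :: t)
    simp only [PySem.List.len_eq, List.length_cons] at this
    rw [this]
    simp

-- ===== VERDICT (by name: the statement is the Claim_ definition above) =====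
theorem isDistinguishable_spec : Claim_equal_isDistinguishable := by
  intro num _
  unfold Spec_isDistinguishable isDistinguishable isDistinguishable_alt
  rw [portB_eq_exists]
  exact portA_eq_exists (PySem.Int.toChars num)
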